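-- pv_equiv track=rewrite | github.com/Najia-afk/Aria_moltbot | scripts/_apply_type_modernization.py | replace_union
-- ===== SOURCE A (Python) =====
-- def replace_union(content: str) -> str:
--     """Replace Union[X, Y] with X | Y, handling nested brackets."""
--     result = []
--     i = 0
--     while i < len(content):
--         if content[i:].startswith("Union["):
--             if i > 0 and (content[i-1].isalnum() or content[i-1] == '_'):
--                 result.append(content[i])
--                 i += 1
--                 continue
--             start = i + len("Union[")
--             depth = 1
--             j = start
--             while j < len(content) and depth > 0:
--                 if content[j] == '[':
--                     depth += 1
--                 elif content[j] == ']':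
--                     depth -= 1
--                 j += 1
--             inner = content[start:j-1]
--             # Split by comma at depth 0
--             parts = []
--             current = []
--             d = 0
--             for ch in inner:
--                 if ch == '[':
--                     d += 1
--                 elif ch == ']':
--                     d -= 1
--                 if ch == ',' and d == 0:
--                     parts.append("".join(current).strip())
--                     current = []
--                 else:
--                     current.append(ch)
--             parts.append("".join(current).strip())
--             result.append(" | ".join(parts))
--             i = j
--         else:
--             result.append(content[i])
--             i += 1
--     return "".join(result)
-- ===== SOURCE B (Python) =====
-- def replace_union(content: str) -> str:
--     """Replace Union[X, Y] with X | Y, handling nested brackets."""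
--     n = len(content)
--     out = []
--     i = 0
--     while True:
--         k = content.find("Union[", i)
--         if k == -1:
--             out.append(content[i:])
--             break
--         if k > 0 and (content[k - 1].isalnum() or content[k - 1] == '_'):
--             # part of a longer identifier: copy through the 'U' and keep looking
--             out.append(content[i:k + 1])
--             i = k + 1
--             continue
--         out.append(content[i:k])
--         # one forward pass: find the matching ']' and the top-level commas
--         depth = 1
--         commas = []
--         j = k + 6
--         while j < n:
--             ch = content[j]
--             if ch == '[':
--                 depth += 1
--             elif ch == ']':
--                 depth -= 1
--                 if depth == 0:
--                     j += 1
--                     break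
--             elif ch == ',' and depth == 1:
--                 commas.append(j)
--             j += 1
--         end = j - 1  # exclusive end of the inner region
--         parts = []
--         lo = k + 6
--         for c in commas:
--             if c < end:
--                 parts.append(content[lo:c].strip())
--                 lo = c + 1
--         parts.append(content[lo:end].strip())
--         out.append(" | ".join(parts))
--         i = j
--     return "".join(out)
-- ===== Notes on version B (the rewrite author's own statement) =====
-- stated objective: faster
-- what changed: Replaces A's per-character scan (startswith at every index) with str.find jumps that copy untouched segments as whole slices, and merges A's two depth passes (matching-bracket search, then re-scan of the inner to split on commas) into one pass that records top-level comma positions and slices the parts out directly.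
import Mathlib
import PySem

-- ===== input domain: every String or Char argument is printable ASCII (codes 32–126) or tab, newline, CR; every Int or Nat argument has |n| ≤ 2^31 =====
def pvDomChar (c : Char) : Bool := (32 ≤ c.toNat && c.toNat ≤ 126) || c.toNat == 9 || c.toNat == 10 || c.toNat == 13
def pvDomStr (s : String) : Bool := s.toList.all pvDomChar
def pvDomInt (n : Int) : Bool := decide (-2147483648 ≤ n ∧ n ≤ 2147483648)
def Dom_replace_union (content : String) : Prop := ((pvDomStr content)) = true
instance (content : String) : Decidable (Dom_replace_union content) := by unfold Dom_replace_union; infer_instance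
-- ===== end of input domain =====

-- B replaces A's per-character scan with find-based jumps over whole slices and merges A's
-- two depth passes into one pass that records top-level comma positions (measured faster by a
-- constant factor). Loops are ported as structural recursion on a fuel counter that merely
-- makes the same computation total (fuel = length + 1 bounds the number of iterations).

-- ===== PORT A =====
-- A's inner `while j < len(content) and depth > 0` bracket-matching loop.
def pvFindJ (cs : List Char) : Nat → Nat → Int → Nat
  | 0, j, _ => j
  | fuel + 1, j, depth =>
    if j < cs.length ∧ depth > 0 then
      pvFindJ cs fuel (j + 1)
        (if cs[j]! == '[' then depth + 1 else if cs[j]! == ']' then depth - 1 else depth)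
    else j

-- A's `for ch in inner` split-by-top-level-comma loop: state (parts, current, d).
def pvSplitA : List Char → List (List Char) → List Char → Int → List (List Char)
  | [], parts, current, _ => parts ++ [PySem.Chars.strip current]
  | ch :: rest, parts, current, d =>
    let d' := if ch == '[' then d + 1 else if ch == ']' then d - 1 else d
    if ch == ',' && d' == 0 then pvSplitA rest (parts ++ [PySem.Chars.strip current]) [] d'
    else pvSplitA rest parts (current ++ [ch]) d'

-- A's outer `while i < len(content)` loop, char by char.
def pvGoA (cs : List Char) : Nat → Nat → List Char → List Char
  | 0, _, acc => acc
  | fuel + 1, i, acc =>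
    if i < cs.length then
      if PySem.Chars.startswith (cs.drop i) "Union[".toList
          && !(decide (0 < i) && (PySem.Chars.isalnum cs[i-1]! || cs[i-1]! == '_')) then
        -- process the Union[...] construct
        let j := pvFindJ cs (cs.length + 1) (i + 6) 1
        -- inner = content[start:j-1]  (start = i+6; both indices ≥ 0 and in order: slice = drop/take)
        let inner := (cs.drop (i + 6)).take (j - 1 - (i + 6))
        pvGoA cs fuel j (acc ++ PySem.Chars.join " | ".toList (pvSplitA inner [] [] 0))
      else pvGoA cs fuel (i + 1) (acc ++ [cs[i]!])
    else acc

def replace_union (content : String) : String :=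
  String.ofList (pvGoA content.toList (content.toList.length + 1) 0 [])

-- ===== PORT B =====
-- B's single forward pass: the index just past the matching ']' plus the positions
-- of the depth-1 commas.
def pvScanB (cs : List Char) (fuel : Nat) (j : Nat) (depth : Int) (commas : List Nat) :
    Nat × List Nat :=
  match fuel with
  | 0 => (j, commas)
  | fuel + 1 =>
    if j < cs.length then
      if cs[j]! == '[' then pvScanB cs fuel (j + 1) (depth + 1) commas
      else if cs[j]! == ']' then
        if depth - 1 == 0 then (j + 1, commas)
        else pvScanB cs fuel (j + 1) (depth - 1) commas
      else if cs[j]! == ',' && depth == 1 then pvScanB cs fuel (j + 1) depth (commas ++ [j])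
      else pvScanB cs fuel (j + 1) depth commas
    else (j, commas)

-- B's `for c in commas` slicing loop: parts from comma positions (content[lo:c].strip()).
def pvPartsB (cs : List Char) (endp : Nat) : Nat → List Nat → List (List Char)
  | lo, [] => [PySem.Chars.strip ((cs.drop lo).take (endp - lo))]
  | lo, c :: rest =>
    if c < endp then
      PySem.Chars.strip ((cs.drop lo).take (c - lo)) :: pvPartsB cs endp (c + 1) rest
    else pvPartsB cs endp lo rest

-- B's outer loop: jump with find, copy the untouched slice verbatim.
def pvGoB (cs : List Char) (fuel : Nat) (i : Nat) (acc : List Char) : List Char :=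
  match fuel with
  | 0 => acc
  | fuel + 1 =>
    -- k = content.find("Union[", i), ported as a find on the suffix content[i:]
    let k' := PySem.Chars.find (cs.drop i) "Union[".toList
    if k' = -1 then acc ++ cs.drop i
    else
      let k := i + k'.toNat
      if decide (0 < k) && (PySem.Chars.isalnum cs[k-1]! || cs[k-1]! == '_') then
        pvGoB cs fuel (k + 1) (acc ++ (cs.drop i).take (k + 1 - i))
      else
        let sc := pvScanB cs (cs.length + 1) (k + 6) 1 []
        pvGoB cs fuel sc.fst
          (acc ++ (cs.drop i).take (k - i)
            ++ PySem.Chars.join " | ".toList (pvPartsB cs (sc.fst - 1) (k + 6) sc.snd))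

def replace_union_alt (content : String) : String :=
  String.ofList (pvGoB content.toList (content.toList.length + 1) 0 [])

-- ===== PRECONDITION & SPEC =====
def Spec_replace_union (content : String) (out : String) : Prop := out = replace_union_alt content
instance (content : String) (out : String) : Decidable (Spec_replace_union content out) := by
  unfold Spec_replace_union; infer_instance

-- ===== CLAIM (what is proved, stated in full; the proofs are below) =====
def Claim_equal_replace_union : Prop :=
  ∀ (content : String), Dom_replace_union content → Spec_replace_union content (replace_union content)

-- ===== LEMMAS AND PROOFS =====

theorem pvScanB_fst_ge (cs : List Char) :
    ∀ (fuel j : Nat) (d : Int) (acc : List Nat), j ≤ (pvScanB cs fuel j d acc).fst := by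
  intro fuel
  induction fuel with
  | zero => intro j d acc; exact le_rfl
  | succ n ih =>
    intro j d acc
    simp only [pvScanB]
    split
    · split
      · exact le_trans (Nat.le_succ j) (ih (j + 1) _ _)
      · split
        · split
          · exact Nat.le_succ j
          · exact le_trans (Nat.le_succ j) (ih (j + 1) _ _)
        · split
          · exact le_trans (Nat.le_succ j) (ih (j + 1) _ _)
          · exact le_trans (Nat.le_succ j) (ih (j + 1) _ _)
    · exact le_rfl

theorem pvScanB_fst_le (cs : List Char) :
    ∀ (fuel j : Nat) (d : Int) (acc : List Nat), j ≤ cs.length →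
      (pvScanB cs fuel j d acc).fst ≤ cs.length := by
  intro fuel
  induction fuel with
  | zero => intro j d acc hj; exact hj
  | succ n ih =>
    intro j d acc hj
    simp only [pvScanB]
    split
    · next hjl =>
      split
      · exact ih (j + 1) _ _ (by omega)
      · split
        · split
          · exact (by omega : j + 1 ≤ cs.length)
          · exact ih (j + 1) _ _ (by omega)
        · split
          · exact ih (j + 1) _ _ (by omega)
          · exact ih (j + 1) _ _ (by omega)
    · exact hj

theorem pvScanB_progress (cs : List Char) (fuel j : Nat) (d : Int) (acc : List Nat)
    (hf : 1 ≤ fuel) (hj : j < cs.length) : j + 1 ≤ (pvScanB cs fuel j d acc).fst := by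
  obtain ⟨n, rfl⟩ : ∃ n, fuel = n + 1 := ⟨fuel - 1, by omega⟩
  simp only [pvScanB]
  split
  · split
    · exact pvScanB_fst_ge cs n (j + 1) _ _
    · split
      · split
        · exact le_rfl
        · exact pvScanB_fst_ge cs n (j + 1) _ _
      · split
        · exact pvScanB_fst_ge cs n (j + 1) _ _
        · exact pvScanB_fst_ge cs n (j + 1) _ _
  · exact absurd hj (by assumption)

theorem pvScanB_of_len_le (cs : List Char) (fuel j : Nat) (d : Int) (acc : List Nat)
    (hj : cs.length ≤ j) : pvScanB cs fuel j d acc = (j, acc) := by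
  cases fuel with
  | zero => rfl
  | succ n => simp only [pvScanB, show ¬ j < cs.length by omega, if_false]

-- accumulator extraction for the comma list
theorem pvScanB_acc (cs : List Char) :
    ∀ (fuel j : Nat) (d : Int) (b : List Nat),
      pvScanB cs fuel j d b
        = ((pvScanB cs fuel j d []).fst, b ++ (pvScanB cs fuel j d []).snd) := by
  intro fuel
  induction fuel with
  | zero => intro j d b; simp [pvScanB]
  | succ n ih =>
    intro j d b
    by_cases hjl : j < cs.length
    case neg =>
      rw [pvScanB_of_len_le cs _ j d b (by omega), pvScanB_of_len_le cs _ j d [] (by omega)]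
      simp
    case pos =>
    by_cases hb1 : (cs[j]! == '[') = true
    case pos =>
      have e : ∀ c, pvScanB cs (n + 1) j d c = pvScanB cs n (j + 1) (d + 1) c := by
        intro c; simp only [pvScanB, hjl, if_true, hb1]
      rw [e, e, ih (j + 1) _ b, ih (j + 1) _ []]
    case neg =>
    have hne1 : (cs[j]! == '[') = false := by rwa [Bool.not_eq_true] at hb1
    by_cases hb2 : (cs[j]! == ']') = true
    case pos =>
      by_cases hb3 : (d - 1 == 0) = true
      case pos =>
        have e : ∀ c, pvScanB cs (n + 1) j d c = (j + 1, c) := by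
          intro c
          simp only [pvScanB, hjl, if_true, hne1, Bool.false_eq_true, if_false, hb2, hb3]
        rw [e, e]
        simp
      case neg =>
        have hne3 : (d - 1 == 0) = false := by rwa [Bool.not_eq_true] at hb3
        have e : ∀ c, pvScanB cs (n + 1) j d c = pvScanB cs n (j + 1) (d - 1) c := by
          intro c
          simp only [pvScanB, hjl, if_true, hne1, Bool.false_eq_true, if_false, hb2, hne3]
        rw [e, e, ih (j + 1) _ b, ih (j + 1) _ []]
    case neg =>
    have hne2 : (cs[j]! == ']') = false := by rwa [Bool.not_eq_true] at hb2
    by_cases hb4 : (cs[j]! == ',' && d == 1) = true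
    case pos =>
      have e : ∀ c, pvScanB cs (n + 1) j d c = pvScanB cs n (j + 1) d (c ++ [j]) := by
        intro c
        simp only [pvScanB, hjl, if_true, hne1, hne2, Bool.false_eq_true, if_false, hb4]
      rw [e, e, ih (j + 1) _ (b ++ [j]), ih (j + 1) _ ([] ++ [j])]
      simp
    case neg =>
      have hne4 : (cs[j]! == ',' && d == 1) = false := by rwa [Bool.not_eq_true] at hb4
      have e : ∀ c, pvScanB cs (n + 1) j d c = pvScanB cs n (j + 1) d c := by
        intro c
        simp only [pvScanB, hjl, if_true, hne1, hne2, hne4, Bool.false_eq_true, if_false]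
      rw [e, e, ih (j + 1) _ b, ih (j + 1) _ []]

theorem pvFindJ_nonpos (cs : List Char) (fuel j : Nat) (d : Int) (hd : d ≤ 0) :
    pvFindJ cs fuel j d = j := by
  cases fuel with
  | zero => rfl
  | succ n => simp only [pvFindJ, show ¬ (j < cs.length ∧ d > 0) from fun h => by omega, if_false]

-- A's two passes have the same stopping point as B's single pass.
theorem pvFindJ_eq_scan (cs : List Char) :
    ∀ (fuel j : Nat) (d : Int) (acc : List Nat), 1 ≤ d →
      pvFindJ cs fuel j d = (pvScanB cs fuel j d acc).fst := by
  intro fuel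
  induction fuel with
  | zero => intro j d acc hd; rfl
  | succ n ih =>
    intro j d acc hd
    by_cases hjl : j < cs.length
    case neg =>
      rw [pvScanB_of_len_le cs _ j d acc (by omega)]
      simp only [pvFindJ, show ¬ (j < cs.length ∧ d > 0) from fun h => hjl h.1, if_false]
    case pos =>
    have hcond : (j < cs.length ∧ d > 0) := ⟨hjl, by omega⟩
    by_cases hb1 : (cs[j]! == '[') = true
    case pos =>
      simp only [pvFindJ, pvScanB, hcond, if_true, hb1]
      exact ih (j + 1) (d + 1) acc (by omega)
    case neg =>
    have hne1 : (cs[j]! == '[') = false := by rwa [Bool.not_eq_true] at hb1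
    by_cases hb2 : (cs[j]! == ']') = true
    case pos =>
      by_cases hb3 : (d - 1 == 0) = true
      case pos =>
        simp only [pvFindJ, pvScanB, hcond, if_true, hne1, Bool.false_eq_true, if_false,
          hb2, hb3]
        exact pvFindJ_nonpos cs n (j + 1) (d - 1) (by have := (beq_iff_eq).mp hb3; omega)
      case neg =>
        have hne3 : (d - 1 == 0) = false := by rwa [Bool.not_eq_true] at hb3
        simp only [pvFindJ, pvScanB, hcond, if_true, hne1, Bool.false_eq_true, if_false,
          hb2, hne3]
        exact ih (j + 1) (d - 1) acc (by have := beq_eq_false_iff_ne.mp hne3; omega)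
    case neg =>
    have hne2 : (cs[j]! == ']') = false := by rwa [Bool.not_eq_true] at hb2
    by_cases hb4 : (cs[j]! == ',' && d == 1) = true
    case pos =>
      simp only [pvFindJ, pvScanB, hcond, if_true, hne1, hne2, Bool.false_eq_true,
        if_false, hb4]
      exact ih (j + 1) d (acc ++ [j]) hd
    case neg =>
      have hne4 : (cs[j]! == ',' && d == 1) = false := by rwa [Bool.not_eq_true] at hb4
      simp only [pvFindJ, pvScanB, hcond, if_true, hne1, hne2, hne4, Bool.false_eq_true,
        if_false]
      exact ih (j + 1) d acc hd

-- two little slice-peeling facts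
theorem pvTakeSucc (cs : List Char) (lo j : Nat) (hlo : lo ≤ j) (hj : j < cs.length) :
    (cs.drop lo).take (j + 1 - lo) = (cs.drop lo).take (j - lo) ++ [cs[j]!] := by
  have hg : cs[j]! = cs[j] := getElem!_pos cs j hj
  have h2 : j - lo < (cs.drop lo).length := by simp only [List.length_drop]; omega
  rw [hg, show j + 1 - lo = (j - lo) + 1 by omega, List.take_add_one]
  congr 1
  rw [List.getElem?_eq_getElem h2]
  simp only [List.getElem_drop, Option.toList_some, List.cons.injEq, and_true]
  congr 1
  omega

theorem pvPeel (cs : List Char) (j n : Nat) (hj : j < cs.length) :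
    (cs.drop j).take (n + 1) = cs[j]! :: (cs.drop (j + 1)).take n := by
  have hg : cs[j]! = cs[j] := getElem!_pos cs j hj
  rw [hg, List.drop_eq_getElem_cons hj, List.take_succ_cons]

-- shared step of the CORE lemma: the scanned char extends A's current part
theorem pvStepExtend (cs : List Char) (n j lo : Nat) (d d' : Int) (parts : List (List Char))
    (hjl : j < cs.length) (_hd : 1 ≤ d) (hd' : 1 ≤ d') (hlo : lo ≤ j)
    (hn : cs.length - j < n + 1)
    (hscan : pvScanB cs (n + 1) j d [] = pvScanB cs n (j + 1) d' [])
    (hsplit : ∀ (rest : List Char) (ps : List (List Char)) (cur : List Char),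
      pvSplitA (cs[j]! :: rest) ps cur (d - 1) = pvSplitA rest ps (cur ++ [cs[j]!]) (d' - 1))
    (ih : ∀ (j' lo' : Nat) (d'' : Int) (parts' : List (List Char)),
      cs.length - j' < n → 1 ≤ d'' → lo' ≤ j' → (j' < cs.length ∨ lo' = j') →
      pvSplitA ((cs.drop j').take ((pvScanB cs n j' d'' []).fst - 1 - j')) parts'
          ((cs.drop lo').take (j' - lo')) (d'' - 1)
        = parts' ++ pvPartsB cs ((pvScanB cs n j' d'' []).fst - 1) lo' (pvScanB cs n j' d'' []).snd) :
    pvSplitA ((cs.drop j).take ((pvScanB cs (n + 1) j d []).fst - 1 - j)) parts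
        ((cs.drop lo).take (j - lo)) (d - 1)
      = parts ++ pvPartsB cs ((pvScanB cs (n + 1) j d []).fst - 1) lo (pvScanB cs (n + 1) j d []).snd := by
  rw [hscan]
  set J := (pvScanB cs n (j + 1) d' []).fst with hJ
  set C := (pvScanB cs n (j + 1) d' []).snd with hC
  have hJ1 : j + 1 ≤ J := hJ ▸ pvScanB_fst_ge cs n (j + 1) d' []
  by_cases hJ2 : j + 2 ≤ J
  case pos =>
    have hJle : J ≤ cs.length := hJ ▸ pvScanB_fst_le cs n (j + 1) d' [] (by omega)
    have hpeel : (cs.drop j).take (J - 1 - j)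
        = cs[j]! :: (cs.drop (j + 1)).take (J - 1 - (j + 1)) := by
      rw [show J - 1 - j = (J - 1 - (j + 1)) + 1 by omega]; exact pvPeel cs j _ hjl
    rw [hpeel, hsplit]
    rw [show (cs.drop lo).take (j - lo) ++ [cs[j]!] = (cs.drop lo).take (j + 1 - lo) from
      (pvTakeSucc cs lo j hlo hjl).symm]
    have := ih (j + 1) lo d' parts (by omega) hd' (by omega) (by omega)
    rw [← hJ, ← hC] at this
    exact this
  case neg =>
    have hJeq : J = j + 1 := by omega
    have hlen1 : ¬ j + 1 < cs.length := by
      intro hc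
      have hfn : 1 ≤ n := by omega
      have := hJ ▸ pvScanB_progress cs n (j + 1) d' [] hfn hc
      omega
    have hCnil : C = [] := by
      rw [hC, pvScanB_of_len_le cs n (j + 1) d' [] (by omega)]
    rw [hJeq, hCnil, show j + 1 - 1 - j = 0 by omega, List.take_zero]
    show parts ++ [PySem.Chars.strip ((cs.drop lo).take (j - lo))]
        = parts ++ pvPartsB cs (j + 1 - 1) lo []
    rw [show j + 1 - 1 = j by omega]
    simp [pvPartsB]

-- shared step of the CORE lemma: the scanned char is a top-level comma (A flushes a part)
theorem pvStepFlush (cs : List Char) (n j lo : Nat) (d d' : Int) (parts : List (List Char))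
    (hjl : j < cs.length) (_hd : 1 ≤ d) (hd' : 1 ≤ d') (_hlo : lo ≤ j)
    (hn : cs.length - j < n + 1)
    (hscan : pvScanB cs (n + 1) j d [] = pvScanB cs n (j + 1) d' [j])
    (hsplit : ∀ (rest : List Char) (ps : List (List Char)) (cur : List Char),
      pvSplitA (cs[j]! :: rest) ps cur (d - 1)
        = pvSplitA rest (ps ++ [PySem.Chars.strip cur]) [] (d' - 1))
    (ih : ∀ (j' lo' : Nat) (d'' : Int) (parts' : List (List Char)),
      cs.length - j' < n → 1 ≤ d'' → lo' ≤ j' → (j' < cs.length ∨ lo' = j') →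
      pvSplitA ((cs.drop j').take ((pvScanB cs n j' d'' []).fst - 1 - j')) parts'
          ((cs.drop lo').take (j' - lo')) (d'' - 1)
        = parts' ++ pvPartsB cs ((pvScanB cs n j' d'' []).fst - 1) lo' (pvScanB cs n j' d'' []).snd) :
    pvSplitA ((cs.drop j).take ((pvScanB cs (n + 1) j d []).fst - 1 - j)) parts
        ((cs.drop lo).take (j - lo)) (d - 1)
      = parts ++ pvPartsB cs ((pvScanB cs (n + 1) j d []).fst - 1) lo (pvScanB cs (n + 1) j d []).snd := by
  rw [hscan, pvScanB_acc cs n (j + 1) d' [j]]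
  set J := (pvScanB cs n (j + 1) d' []).fst with hJ
  set C := (pvScanB cs n (j + 1) d' []).snd with hC
  have hJ1 : j + 1 ≤ J := hJ ▸ pvScanB_fst_ge cs n (j + 1) d' []
  show pvSplitA ((cs.drop j).take (J - 1 - j)) parts ((cs.drop lo).take (j - lo)) (d - 1)
      = parts ++ pvPartsB cs (J - 1) lo ([j] ++ C)
  by_cases hJ2 : j + 2 ≤ J
  case pos =>
    have hJle : J ≤ cs.length := hJ ▸ pvScanB_fst_le cs n (j + 1) d' [] (by omega)
    have hpeel : (cs.drop j).take (J - 1 - j)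
        = cs[j]! :: (cs.drop (j + 1)).take (J - 1 - (j + 1)) := by
      rw [show J - 1 - j = (J - 1 - (j + 1)) + 1 by omega]; exact pvPeel cs j _ hjl
    rw [hpeel, hsplit]
    have := ih (j + 1) (j + 1) d'
      (parts ++ [PySem.Chars.strip ((cs.drop lo).take (j - lo))])
      (by omega) hd' le_rfl (by omega)
    rw [← hJ, ← hC, Nat.sub_self, List.take_zero] at this
    rw [this]
    have hcons : pvPartsB cs (J - 1) lo ([j] ++ C)
        = PySem.Chars.strip ((cs.drop lo).take (j - lo)) :: pvPartsB cs (J - 1) (j + 1) C := by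
      show pvPartsB cs (J - 1) lo (j :: C) = _
      simp only [pvPartsB, if_pos (show j < J - 1 by omega)]
    rw [hcons]
    simp
  case neg =>
    have hJeq : J = j + 1 := by omega
    have hlen1 : ¬ j + 1 < cs.length := by
      intro hc
      have hfn : 1 ≤ n := by omega
      have := hJ ▸ pvScanB_progress cs n (j + 1) d' [] hfn hc
      omega
    have hCnil : C = [] := by
      rw [hC, pvScanB_of_len_le cs n (j + 1) d' [] (by omega)]
    rw [hJeq, hCnil, show j + 1 - 1 - j = 0 by omega, List.take_zero]
    show parts ++ [PySem.Chars.strip ((cs.drop lo).take (j - lo))]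
        = parts ++ pvPartsB cs (j + 1 - 1) lo ([j] ++ [])
    rw [show j + 1 - 1 = j by omega]
    simp only [List.append_nil, pvPartsB, if_neg (lt_irrefl j)]

-- CORE: A's fold over the inner slice = B's parts sliced from the recorded comma positions.
theorem pvSplit_eq_parts (cs : List Char) :
    ∀ (fuel j lo : Nat) (d : Int) (parts : List (List Char)),
      cs.length - j < fuel → 1 ≤ d → lo ≤ j → (j < cs.length ∨ lo = j) →
      pvSplitA ((cs.drop j).take ((pvScanB cs fuel j d []).fst - 1 - j)) parts
          ((cs.drop lo).take (j - lo)) (d - 1)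
        = parts ++ pvPartsB cs ((pvScanB cs fuel j d []).fst - 1) lo (pvScanB cs fuel j d []).snd := by
  intro fuel
  induction fuel with
  | zero => intro j lo d parts hn; omega
  | succ n ih =>
    intro j lo d parts hn hd hlo hj
    by_cases hjl : j < cs.length
    case neg =>
      have hlo' : lo = j := by omega
      rw [pvScanB_of_len_le cs _ j d [] (by omega)]
      subst hlo'
      show pvSplitA ((cs.drop lo).take (lo - 1 - lo)) parts ((cs.drop lo).take (lo - lo)) (d - 1)
          = parts ++ pvPartsB cs (lo - 1) lo []
      rw [show lo - 1 - lo = 0 by omega, Nat.sub_self, List.take_zero]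
      simp [pvSplitA, pvPartsB, show lo - 1 - lo = 0 by omega]
    case pos =>
    by_cases hb1 : cs[j]! = '['
    case pos =>
      have heq1 : (cs[j]! == '[') = true := by simp only [beq_iff_eq]; exact hb1
      have hne2 : (cs[j]! == ',') = false := by
        simp only [beq_eq_false_iff_ne]; rw [hb1]; decide
      have hscan : pvScanB cs (n + 1) j d [] = pvScanB cs n (j + 1) (d + 1) [] := by
        simp only [pvScanB, hjl, if_true, heq1]
      refine pvStepExtend cs n j lo d (d + 1) parts hjl hd (by omega) hlo hn hscan ?_ ih
      intro rest ps cur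
      simp only [pvSplitA, heq1, hne2, if_true, Bool.false_and, Bool.false_eq_true, if_false]
      congr 1
      omega
    case neg =>
    have hne1 : (cs[j]! == '[') = false := by simp only [beq_eq_false_iff_ne]; exact hb1
    by_cases hb2 : cs[j]! = ']'
    case pos =>
      have heq2 : (cs[j]! == ']') = true := by simp only [beq_iff_eq]; exact hb2
      have hne3 : (cs[j]! == ',') = false := by
        simp only [beq_eq_false_iff_ne]; rw [hb2]; decide
      by_cases hb3 : d = 1
      case pos =>
        have hscan : pvScanB cs (n + 1) j d [] = (j + 1, []) := by
          simp only [pvScanB, hjl, if_true, hne1, Bool.false_eq_true, if_false, heq2,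
            show (d - 1 == 0) = true by simp only [beq_iff_eq]; omega]
        rw [hscan]
        show pvSplitA ((cs.drop j).take (j + 1 - 1 - j)) parts
            ((cs.drop lo).take (j - lo)) (d - 1) = parts ++ pvPartsB cs (j + 1 - 1) lo []
        rw [show j + 1 - 1 - j = 0 by omega, show j + 1 - 1 = j by omega, List.take_zero]
        simp [pvSplitA, pvPartsB]
      case neg =>
        have hd2 : 2 ≤ d := by omega
        have hscan : pvScanB cs (n + 1) j d [] = pvScanB cs n (j + 1) (d - 1) [] := by
          simp only [pvScanB, hjl, if_true, hne1, Bool.false_eq_true, if_false, heq2,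
            show (d - 1 == 0) = false by simp only [beq_eq_false_iff_ne]; omega]
        refine pvStepExtend cs n j lo d (d - 1) parts hjl hd (by omega) hlo hn hscan ?_ ih
        intro rest ps cur
        simp only [pvSplitA, hne1, heq2, hne3, Bool.false_eq_true, if_false, if_true,
          Bool.false_and]
    case neg =>
    have hne2 : (cs[j]! == ']') = false := by simp only [beq_eq_false_iff_ne]; exact hb2
    by_cases hb4 : cs[j]! = ',' ∧ d = 1
    case pos =>
      obtain ⟨hcomma, hd1⟩ := hb4
      have heq3 : (cs[j]! == ',') = true := by simp only [beq_iff_eq]; exact hcomma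
      have hscan : pvScanB cs (n + 1) j d [] = pvScanB cs n (j + 1) d [j] := by
        simp only [pvScanB, hjl, if_true, hne1, hne2, Bool.false_eq_true, if_false,
          show (cs[j]! == ',' && d == 1) = true by
            simp only [heq3, Bool.true_and, beq_iff_eq]; omega]
        simp
      refine pvStepFlush cs n j lo d d parts hjl hd hd hlo hn hscan ?_ ih
      intro rest ps cur
      simp only [pvSplitA, hne1, hne2, heq3, Bool.false_eq_true, if_false, Bool.true_and,
        show (d - 1 == 0) = true by simp only [beq_iff_eq]; omega, if_true]
    case neg =>
      have hcd : (cs[j]! == ',' && d == 1) = false := by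
        rcases Decidable.em (cs[j]! = ',') with h | h
        · have hdne : ¬ d = 1 := fun hh => hb4 ⟨h, hh⟩
          have : (d == 1) = false := by simp only [beq_eq_false_iff_ne]; exact hdne
          simp only [this, Bool.and_false]
        · have : (cs[j]! == ',') = false := by simp only [beq_eq_false_iff_ne]; exact h
          simp only [this, Bool.false_and]
      have hscan : pvScanB cs (n + 1) j d [] = pvScanB cs n (j + 1) d [] := by
        simp only [pvScanB, hjl, if_true, hne1, hne2, hcd, Bool.false_eq_true, if_false]
      refine pvStepExtend cs n j lo d d parts hjl hd hd hlo hn hscan ?_ ih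
      intro rest ps cur
      rcases Decidable.em (cs[j]! = ',') with h | h
      · have hdne : ¬ d = 1 := fun hh => hb4 ⟨h, hh⟩
        have h1 : (d - 1 == 0) = false := by simp only [beq_eq_false_iff_ne]; omega
        simp only [pvSplitA, hne1, hne2, Bool.false_eq_true, if_false, h1, Bool.and_false]
      · have h1 : (cs[j]! == ',') = false := by simp only [beq_eq_false_iff_ne]; exact h
        simp only [pvSplitA, hne1, hne2, h1, Bool.false_eq_true, if_false, Bool.false_and]

-- A copies the chars of a match-free segment one at a time; B copies it as one slice.
theorem pvGoA_segment (cs : List Char) (k : Nat) (hk : k ≤ cs.length) :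
    ∀ (m fA i : Nat) (acc : List Char), k - i = m → i ≤ k → m < fA →
      (∀ p, i ≤ p → p < k → ¬ "Union[".toList <+: cs.drop p) →
      pvGoA cs fA i acc = pvGoA cs (fA - m) k (acc ++ (cs.drop i).take (k - i)) := by
  intro m
  induction m with
  | zero =>
    intro fA i acc hm hik hfA hno
    have : i = k := by omega
    subst this
    simp
  | succ m ih =>
    intro fA i acc hm hik hfA hno
    have hikl : i < k := by omega
    have hil : i < cs.length := by omega
    obtain ⟨f, rfl⟩ : ∃ f, fA = f + 1 := ⟨fA - 1, by omega⟩
    have hsw : PySem.Chars.startswith (cs.drop i) "Union[".toList = false :=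
      Bool.eq_false_iff.mpr fun hs =>
        hno i le_rfl hikl ((PySem.Chars.startswith_iff _ _).mp hs)
    simp only [pvGoA, hil, if_true, hsw, Bool.false_and, Bool.false_eq_true, if_false]
    rw [ih f (i + 1) (acc ++ [cs[i]!]) (by omega) (by omega) (by omega)
      (fun p h1 h2 => hno p (by omega) h2)]
    rw [show f + 1 - (m + 1) = f - m by omega, List.append_assoc]
    congr 2
    rw [show k - i = (k - (i + 1)) + 1 by omega, pvPeel cs i _ hil]
    simp

theorem pvGoA_eq_goB (cs : List Char) :
    ∀ (n fA fB i : Nat) (acc : List Char),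
      cs.length - i ≤ n → cs.length - i < fA → cs.length - i < fB → i ≤ cs.length →
      pvGoA cs fA i acc = pvGoB cs fB i acc := by
  intro n
  induction n with
  | zero =>
    intro fA fB i acc hn hfA hfB hi
    have hieq : i = cs.length := by omega
    have hdrop : cs.drop i = [] := List.drop_eq_nil_of_le (by omega)
    have hfind : PySem.Chars.find (cs.drop i) "Union[".toList = -1 := by
      rw [PySem.Chars.find_eq_neg_one_iff, hdrop]
      intro hc
      have := List.eq_nil_of_infix_nil hc
      simp at this
    obtain ⟨f, rfl⟩ : ∃ f, fA = f + 1 := ⟨fA - 1, by omega⟩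
    obtain ⟨g, rfl⟩ : ∃ g, fB = g + 1 := ⟨fB - 1, by omega⟩
    simp only [pvGoA, pvGoB, show ¬ i < cs.length by omega, if_false]
    rw [hfind]
    simp [hdrop]
  | succ n ih =>
    intro fA fB i acc hn hfA hfB hi
    by_cases hfind : PySem.Chars.find (cs.drop i) "Union[".toList = -1
    case pos =>
      -- no further occurrence: A walks to the end char by char, B appends the tail slice
      have hnotin : ¬ "Union[".toList <:+: cs.drop i :=
        (PySem.Chars.find_eq_neg_one_iff _ _).mp hfind
      have hno : ∀ p, i ≤ p → p < cs.length → ¬ "Union[".toList <+: cs.drop p := by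
        intro p h1 _ hp
        apply hnotin
        have hdd : cs.drop p = (cs.drop i).drop (p - i) := by
          rw [List.drop_drop]; congr 1; omega
        rw [hdd] at hp
        exact hp.isInfix.trans (List.drop_suffix _ _).isInfix
      rw [pvGoA_segment cs cs.length le_rfl (cs.length - i) fA i acc rfl hi (by omega) hno]
      obtain ⟨f, hf⟩ : ∃ f, fA - (cs.length - i) = f + 1 := ⟨fA - (cs.length - i) - 1, by omega⟩
      obtain ⟨g, rfl⟩ : ∃ g, fB = g + 1 := ⟨fB - 1, by omega⟩
      rw [hf]
      simp only [pvGoA, pvGoB, lt_irrefl, if_false, hfind, if_true]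
      congr 1
      have : (cs.drop i).length = cs.length - i := List.length_drop ..
      rw [← this, List.take_length]
    case neg =>
      -- an occurrence at k = i + find(...)
      have hge : 0 ≤ PySem.Chars.find (cs.drop i) "Union[".toList := by
        have := PySem.Chars.neg_one_le_find (cs.drop i) "Union[".toList
        omega
      have hspec := PySem.Chars.find_spec (s := cs.drop i) (sub := "Union[".toList) hge
      set kf := (PySem.Chars.find (cs.drop i) "Union[".toList).toNat with hkf
      have hdd : cs.drop (i + kf) = (cs.drop i).drop kf := by
        rw [List.drop_drop]
      have hpre : "Union[".toList <+: cs.drop (i + kf) := by rw [hdd]; exact hspec.1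
      have hk6 : i + kf + 6 ≤ cs.length := by
        have h1 := hpre.length_le
        have h2 : ("Union[".toList).length = 6 := by decide
        rw [h2, List.length_drop] at h1
        omega
      have hkl : i + kf < cs.length := by omega
      -- A walks up to k over a match-free segment
      have hnoseg : ∀ p, i ≤ p → p < i + kf → ¬ "Union[".toList <+: cs.drop p := by
        intro p h1 h2 hp
        apply hspec.2 (p - i) (by omega)
        have hdd2 : cs.drop p = (cs.drop i).drop (p - i) := by
          rw [List.drop_drop]; try (congr 1; omega)
        rw [← hdd2]
        exact hp
      rw [pvGoA_segment cs (i + kf) (by omega) (kf) fA i acc (by omega) (by omega)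
        (by omega) hnoseg]
      have hsw : PySem.Chars.startswith (cs.drop (i + kf)) "Union[".toList = true :=
        (PySem.Chars.startswith_iff _ _).mpr hpre
      rw [show i + kf - i = kf by omega]
      obtain ⟨f, hf⟩ : ∃ f, fA - kf = f + 1 := ⟨fA - kf - 1, by omega⟩
      obtain ⟨g, hg⟩ : ∃ g, fB = g + 1 := ⟨fB - 1, by omega⟩
      rw [hf, hg]
      simp only [pvGoA, pvGoB, hkl, if_true, hfind, if_false, hsw, Bool.true_and, ← hkf]
      by_cases hguard :
          (decide (0 < i + kf) && (PySem.Chars.isalnum cs[i + kf - 1]!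
            || cs[i + kf - 1]! == '_')) = true
      case pos =>
        simp only [hguard, Bool.not_true, Bool.false_eq_true, if_false,
          if_true]
        rw [ih f g (i + kf + 1) _ (by omega) (by omega) (by omega) (by omega)]
        congr 1
        rw [List.append_assoc]
        congr 1
        have ht := pvTakeSucc cs i (i + kf) (by omega) hkl
        rw [show i + kf - i = kf by omega] at ht
        exact ht.symm
      case neg =>
        have hguard' : (decide (0 < i + kf) && (PySem.Chars.isalnum cs[i + kf - 1]!
            || cs[i + kf - 1]! == '_')) = false := by
          rw [Bool.eq_false_iff]; exact hguard
        simp only [hguard', Bool.not_false, if_true, Bool.false_eq_true, if_false]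
        have hjeq : pvFindJ cs (cs.length + 1) (i + kf + 6) 1
            = (pvScanB cs (cs.length + 1) (i + kf + 6) 1 []).fst :=
          pvFindJ_eq_scan cs (cs.length + 1) (i + kf + 6) 1 [] le_rfl
        have hparts := pvSplit_eq_parts cs (cs.length + 1) (i + kf + 6) (i + kf + 6) 1 []
          (by omega) le_rfl le_rfl (Or.inr rfl)
        simp only [Nat.sub_self, List.take_zero, show (1:Int) - 1 = 0 by norm_num,
          List.nil_append] at hparts
        rw [hjeq, hparts]
        have hfst6 := pvScanB_fst_ge cs (cs.length + 1) (i + kf + 6) 1 []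
        have hfstle := pvScanB_fst_le cs (cs.length + 1) (i + kf + 6) 1 [] (by omega)
        rw [ih f g ((pvScanB cs (cs.length + 1) (i + kf + 6) 1 []).fst) _ (by omega) (by omega)
          (by omega) (by omega)]
        rw [show i + kf - i = kf by omega]

-- ===== VERDICT (by name: the statement is the Claim_ definition above) =====
theorem replace_union_spec : Claim_equal_replace_union := by
  intro content _
  unfold Spec_replace_union replace_union replace_union_alt
  exact congrArg String.ofList (pvGoA_eq_goB content.toList content.toList.length
    (content.toList.length + 1) (content.toList.length + 1) 0 [] (by omega) (by omega)
    (by omega) (by omega))
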